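-- pv_equiv track=rewrite | github.com/AM-Campbell/mnmd-anki-sync | src/mnmd_anki_sync/parser/scope_resolver.py | get_paragraph_boundaries
-- ===== SOURCE A (Python) =====
-- from typing import List, Tuple
--
-- def get_paragraph_boundaries(text: str) -> List[Tuple[int, int]]:
--     """Find all paragraph boundaries in text.
--
--     A paragraph is a sequence of non-empty lines separated by empty lines.
--
--     Args:
--         text: The text to analyze
--
--     Returns:
--         List of (start_line, end_line) tuples for each paragraph
--
--     Examples:
--         >>> text = "Para 1.\\n\\nPara 2.\\n\\nPara 3."
--         >>> boundaries = get_paragraph_boundaries(text)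
--         >>> len(boundaries)
--         3
--         >>> boundaries[0]
--         (0, 0)
--         >>> boundaries[1]
--         (2, 2)
--     """
--     lines = text.split("\n")
--     paragraphs = []
--     current_para_start = None
--     current_para_end = None
--
--     for i, line in enumerate(lines):
--         if line.strip():  # Non-empty line
--             if current_para_start is None:
--                 current_para_start = i
--             current_para_end = i
--         else:  # Empty line
--             if current_para_start is not None:
--                 paragraphs.append((current_para_start, current_para_end))
--                 current_para_start = None
--                 current_para_end = None
--
--     # Handle last paragraph
--     if current_para_start is not None:
--         paragraphs.append((current_para_start, current_para_end))
--
--     return paragraphs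
-- ===== SOURCE B (Python) =====
-- from typing import List, Tuple
--
-- def get_paragraph_boundaries(text: str) -> List[Tuple[int, int]]:
--     """Staged passes: mark blank lines, detect paragraph starts and ends
--     independently by comparing each line with its neighbour, then zip them."""
--     blanks = [not line.strip() for line in text.split("\n")]
--     starts = [i for i, (prev, cur) in enumerate(zip([True] + blanks, blanks))
--               if prev and not cur]
--     ends = [i for i, (cur, nxt) in enumerate(zip(blanks, blanks[1:] + [True]))
--             if not cur and nxt]
--     return list(zip(starts, ends))
-- ===== Notes on version B (the rewrite author's own statement) =====
-- stated objective: alternative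
-- what changed: Replaces the single-pass mutable start/end state machine (with its trailing-paragraph special case) by staged passes: a blank-line mask, independent neighbour-comparison passes computing the paragraph start indices and end indices, and a zip of the two.
import Mathlib
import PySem

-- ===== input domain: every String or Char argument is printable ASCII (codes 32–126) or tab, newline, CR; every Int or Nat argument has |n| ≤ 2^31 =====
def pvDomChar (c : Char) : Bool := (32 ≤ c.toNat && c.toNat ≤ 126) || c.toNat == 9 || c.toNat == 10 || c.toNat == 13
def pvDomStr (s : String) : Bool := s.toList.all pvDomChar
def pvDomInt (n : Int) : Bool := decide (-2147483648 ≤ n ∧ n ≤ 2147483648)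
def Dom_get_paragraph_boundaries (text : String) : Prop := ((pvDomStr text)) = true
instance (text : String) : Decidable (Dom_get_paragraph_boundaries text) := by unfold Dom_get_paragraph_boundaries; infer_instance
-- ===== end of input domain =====

-- B replaces A's mutable start/end state machine by staged passes (blank mask, independent
-- neighbour-comparison start/end passes, zip); same result, same O(n) cost.

-- ===== PORT A =====
-- `bool(line.strip())` — truthiness of the stripped line
def pvNonblank (l : String) : Bool := PySem.Str.strip l != ""

-- the loop body of A: state = (paragraphs, current_para_start, current_para_end)
def pvStepA (s : List (Int × Int) × Option Int × Option Int) (p : Int × String) :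
    List (Int × Int) × Option Int × Option Int :=
  if pvNonblank p.2 then
    match s.2.1 with
    | none => (s.1, some p.1, some p.1)
    | some a => (s.1, some a, some p.1)
  else
    match s.2.1 with
    | some a => (s.1 ++ [(a, s.2.2.getD a)], none, none)  -- current_para_end is always set here; getD's default is unreachable
    | none => s

def get_paragraph_boundaries (text : String) : List (Int × Int) :=
  let lines := ((PySem.Str.split? text "\n").getD [])
  let r := (PySem.List.enumerate lines 0).foldl pvStepA ([], none, none)
  -- handle last paragraph
  match r.2.1 with
  | some a => r.1 ++ [(a, r.2.2.getD a)]
  | none => r.1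

-- ===== PORT B =====
-- `not line.strip()` — the blank-line mask entry
def pvBlank (l : String) : Bool := PySem.Str.strip l == ""

def get_paragraph_boundaries_alt (text : String) : List (Int × Int) :=
  let blanks := (((PySem.Str.split? text "\n").getD []).map pvBlank)
  -- starts: i such that prev blank and cur non-blank, zipping [True]+blanks with blanks
  let starts := ((PySem.List.enumerate ((true :: blanks).zip blanks) 0).filter
      (fun p => p.2.1 && !p.2.2)).map (fun p => p.1)
  -- ends: i such that cur non-blank and next blank, zipping blanks with blanks[1:]+[True]
  let ends := ((PySem.List.enumerate (blanks.zip (blanks.drop 1 ++ [true])) 0).filter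
      (fun p => !p.2.1 && p.2.2)).map (fun p => p.1)
  starts.zip ends

-- ===== PRECONDITION & SPEC =====
def Spec_get_paragraph_boundaries (text : String) (out : List (Int × Int)) : Prop := out = get_paragraph_boundaries_alt text
instance (text : String) (out : List (Int × Int)) : Decidable (Spec_get_paragraph_boundaries text out) := by unfold Spec_get_paragraph_boundaries; infer_instance

-- ===== CLAIM (what is proved, stated in full; the proofs are below) =====
def Claim_equal_get_paragraph_boundaries : Prop := ∀ (text : String), Dom_get_paragraph_boundaries text → Spec_get_paragraph_boundaries text (get_paragraph_boundaries text)

-- ===== LEMMAS AND PROOFS =====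

-- common reference shape: the paragraphs of a blank-mask list, by run decomposition
def pvParas : List Bool → Int → List (Int × Int)
  | [], _ => []
  | b :: t, i =>
    if b then pvParas t (i + 1)
    else (i, i + ((t.takeWhile (fun x => !x)).length : Int)) ::
      pvParas (t.dropWhile (fun x => !x)) (i + 1 + (t.takeWhile (fun x => !x)).length)
termination_by bs => bs.length
decreasing_by
  · simp
  · exact Nat.lt_succ_of_le (List.length_dropWhile_le _ _)

lemma pvParas_cons_true (t : List Bool) (i : Int) : pvParas (true :: t) i = pvParas t (i + 1) := by
  rw [pvParas]
  simp

lemma pvParas_cons_false (t : List Bool) (i : Int) :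
    pvParas (false :: t) i =
      (i, i + ((t.takeWhile (fun x => !x)).length : Int)) ::
        pvParas (t.dropWhile (fun x => !x)) (i + 1 + (t.takeWhile (fun x => !x)).length) := by
  rw [pvParas]
  simp

-- recursive characterizations of B's two filter passes
def pvS : Bool → List Bool → Int → List Int
  | _, [], _ => []
  | prev, b :: t, i => (if prev && !b then [i] else []) ++ pvS b t (i + 1)

def pvE : List Bool → Int → List Int
  | [], _ => []
  | b :: t, i => (if !b && t.headD true then [i] else []) ++ pvE t (i + 1)

-- A's whole computation on a remaining enumerated line list, from a given state
def pvFinA (xs : List (Int × String)) (acc : List (Int × Int)) (st : Option Int × Option Int) :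
    List (Int × Int) :=
  let r := xs.foldl pvStepA (acc, st)
  match r.2.1 with
  | some a => r.1 ++ [(a, r.2.2.getD a)]
  | none => r.1

lemma pvBlank_not (l : String) : (!pvBlank l) = pvNonblank l := rfl

-- B's starts pass equals pvS
lemma pvStarts_eq (bs : List Bool) (prev : Bool) (i : Int) :
    ((PySem.List.enumerate ((prev :: bs).zip bs) i).filter
      (fun p => p.2.1 && !p.2.2)).map (fun p => p.1) = pvS prev bs i := by
  induction bs generalizing prev i with
  | nil => simp [pvS]
  | cons b t ih =>
    have hz : (prev :: b :: t).zip (b :: t) = (prev, b) :: ((b :: t).zip t) := rfl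
    rw [hz, PySem.List.enumerate_cons, List.filter_cons, pvS]
    by_cases h : prev && !b <;> simp [h, ih]

-- the shifted zip of B's ends pass, one step
lemma pvZipShift (b : Bool) (t : List Bool) :
    (b :: t).zip (((b :: t).drop 1) ++ [true]) =
      (b, t.headD true) :: t.zip (t.drop 1 ++ [true]) := by
  cases t <;> rfl

-- B's ends pass equals pvE
lemma pvEnds_eq (bs : List Bool) (i : Int) :
    ((PySem.List.enumerate (bs.zip (bs.drop 1 ++ [true])) i).filter
      (fun p => !p.2.1 && p.2.2)).map (fun p => p.1) = pvE bs i := by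
  induction bs generalizing i with
  | nil => simp [pvE]
  | cons b t ih =>
    rw [pvZipShift, PySem.List.enumerate_cons, List.filter_cons, pvE]
    by_cases h : b = false ∧ t.head?.getD true = true <;>
      simp [h, List.headD_eq_head?_getD] <;>
      (rw [← List.drop_one]; exact ih _)

-- inside a non-blank run pvS emits nothing
lemma pvS_run (t : List Bool) (i : Int) :
    pvS false t i =
      pvS false (t.dropWhile (fun x => !x)) (i + (t.takeWhile (fun x => !x)).length) := by
  induction t generalizing i with
  | nil => simp
  | cons b u ih =>
    cases b with
    | false =>
      rw [pvS]
      simp only [Bool.false_and, Bool.false_eq_true, if_false, List.nil_append]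
      rw [ih]
      norm_num
      congr 1
      push_cast
      ring
    | true => simp

-- pvE on a run headed by a non-blank line: the end is at the last line of the run
lemma pvE_run (t : List Bool) (i : Int) :
    pvE (false :: t) i =
      (i + ((t.takeWhile (fun x => !x)).length : Int)) ::
        pvE (t.dropWhile (fun x => !x)) (i + 1 + (t.takeWhile (fun x => !x)).length) := by
  induction t generalizing i with
  | nil => simp [pvE]
  | cons b u ih =>
    cases b with
    | false =>
      have h1 : pvE (false :: false :: u) i = pvE (false :: u) (i + 1) := by
        rw [pvE]; simp
      rw [h1, ih]
      norm_num
      constructor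
      · push_cast; ring
      · congr 1; ring
    | true =>
      rw [pvE]
      simp [pvE]

-- pvS ignores a leading state flag when the list does not start non-blank
lemma pvS_flag (t : List Bool) (i : Int) (h : t.headD true = true) :
    pvS false t i = pvS true t i := by
  cases t with
  | nil => rfl
  | cons b u =>
    simp only [List.headD_cons] at h
    subst h
    rw [pvS, pvS]
    simp

-- zip of the two passes equals the run decomposition
lemma pvZip_eq (bs : List Bool) (i : Int) :
    (pvS true bs i).zip (pvE bs i) = pvParas bs i := by
  induction bs, i using pvParas.induct with
  | case1 i => simp [pvS, pvE, pvParas]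
  | case2 t i ih =>
    rw [pvParas_cons_true, pvS, pvE]
    simpa using ih
  | case3 b t i hb ih =>
    have hb' : b = false := by cases b; rfl; exact absurd rfl hb
    subst hb'
    rw [pvParas_cons_false]
    have hs : pvS true (false :: t) i = i :: pvS false t (i + 1) := by
      rw [pvS]; simp
    rw [hs, pvE_run, pvS_run, List.zip_cons_cons]
    congr 1
    have harr : i + 1 + ((t.takeWhile (fun x => !x)).length : Int) =
        i + ((t.takeWhile (fun x => !x)).length : Int) + 1 := by ring
    rw [harr]
    rw [pvS_flag _ _ (by
      cases hdw : t.dropWhile (fun x => !x) with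
      | nil => rfl
      | cons c v =>
        have := List.head_dropWhile_not (p := (fun x : Bool => !x)) (l := t)
          (by simp [hdw])
        simp [hdw] at this ⊢
        exact this)]
    rw [← harr]
    exact ih

-- the main invariant: A's scan from either state equals the run decomposition of the blank mask
lemma pvMain (ls : List String) (i : Int) (acc : List (Int × Int)) :
    (pvFinA (PySem.List.enumerate ls i) acc (none, none) =
        acc ++ pvParas (ls.map pvBlank) i) ∧
    (∀ a b : Int,
      pvFinA (PySem.List.enumerate ls i) acc (some a, some b) =
        acc ++ (a, if (ls.takeWhile pvNonblank).length = 0 then b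
                   else i + (ls.takeWhile pvNonblank).length - 1) ::
          pvParas ((ls.dropWhile pvNonblank).map pvBlank)
            (i + (ls.takeWhile pvNonblank).length)) := by
  induction ls generalizing i acc with
  | nil =>
    constructor
    · simp [pvFinA, pvParas, PySem.List.enumerate]
    · intro a b
      simp [pvFinA, pvParas, PySem.List.enumerate]
  | cons l t ih =>
    have hmapTake : (t.map pvBlank).takeWhile (fun x => !x) = (t.takeWhile pvNonblank).map pvBlank := by
      rw [List.takeWhile_map]
      rfl
    have hmapDrop : (t.map pvBlank).dropWhile (fun x => !x) = (t.dropWhile pvNonblank).map pvBlank := by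
      rw [List.dropWhile_map]
      rfl
    constructor
    · rw [PySem.List.enumerate_cons]
      by_cases h : pvNonblank l
      · have hbl : pvBlank l = false := by
          have := pvBlank_not l; rw [h] at this; simpa using this
        have step : pvFinA ((i, l) :: PySem.List.enumerate t (i + 1)) acc (none, none) =
            pvFinA (PySem.List.enumerate t (i + 1)) acc (some i, some i) := by
          simp [pvFinA, pvStepA, h]
        rw [step, (ih (i + 1) acc).2 i i]
        simp only [List.map_cons, hbl]
        rw [pvParas_cons_false, hmapTake, hmapDrop]
        simp only [List.length_map]
        have hval : (if (t.takeWhile pvNonblank).length = 0 then i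
            else i + 1 + ((t.takeWhile pvNonblank).length : Int) - 1) =
            i + ((t.takeWhile pvNonblank).length : Int) := by
          split_ifs with h0
          · simp [h0]
          · omega
        rw [hval]
      · have h' : pvNonblank l = false := by simpa using h
        have hbl : pvBlank l = true := by
          have := pvBlank_not l; rw [h'] at this; simpa using this
        have step : pvFinA ((i, l) :: PySem.List.enumerate t (i + 1)) acc (none, none) =
            pvFinA (PySem.List.enumerate t (i + 1)) acc (none, none) := by
          simp [pvFinA, pvStepA, h']
        rw [step, (ih (i + 1) acc).1]
        simp only [List.map_cons, hbl]
        rw [pvParas_cons_true]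
    · intro a b
      rw [PySem.List.enumerate_cons]
      by_cases h : pvNonblank l
      · have step : pvFinA ((i, l) :: PySem.List.enumerate t (i + 1)) acc (some a, some b) =
            pvFinA (PySem.List.enumerate t (i + 1)) acc (some a, some i) := by
          simp [pvFinA, pvStepA, h]
        rw [step, (ih (i + 1) acc).2 a i]
        simp only [List.takeWhile_cons, List.dropWhile_cons, h, if_true, List.length_cons]
        rw [if_neg (Nat.add_one_ne_zero _)]
        have hval : (if (t.takeWhile pvNonblank).length = 0 then i
            else i + 1 + ((t.takeWhile pvNonblank).length : Int) - 1) =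
            i + (((t.takeWhile pvNonblank).length + 1 : Nat) : Int) - 1 := by
          split_ifs with h0
          · simp [h0]
          · push_cast; ring
        have hidx : i + 1 + ((t.takeWhile pvNonblank).length : Int) =
            i + (((t.takeWhile pvNonblank).length + 1 : Nat) : Int) := by push_cast; ring
        rw [hval, hidx]
      · have h' : pvNonblank l = false := by simpa using h
        have hbl : pvBlank l = true := by
          have := pvBlank_not l; rw [h'] at this; simpa using this
        have step : pvFinA ((i, l) :: PySem.List.enumerate t (i + 1)) acc (some a, some b) =
            pvFinA (PySem.List.enumerate t (i + 1)) (acc ++ [(a, b)]) (none, none) := by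
          simp [pvFinA, pvStepA, h']
        rw [step, (ih (i + 1) (acc ++ [(a, b)])).1]
        simp only [List.takeWhile_cons, List.dropWhile_cons, h', Bool.false_eq_true, if_false,
          List.append_assoc, List.singleton_append, List.map_cons, hbl]
        rw [pvParas_cons_true]
        simp

-- ===== VERDICT (by name: the statement is the Claim_ definition above) =====
theorem get_paragraph_boundaries_spec : Claim_equal_get_paragraph_boundaries := by
  intro text _
  unfold Spec_get_paragraph_boundaries
  show get_paragraph_boundaries text = get_paragraph_boundaries_alt text
  simp only [get_paragraph_boundaries, get_paragraph_boundaries_alt]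
  rw [pvStarts_eq, pvEnds_eq, pvZip_eq]
  have h := (pvMain (((PySem.Str.split? text "\n").getD [])) 0 []).1
  simpa [pvFinA] using h
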